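-- pv_equiv track=rewrite | github.com/solefroni/airrml-2025-winning-solution | ds2/code/train.py | generate_masks
-- ===== SOURCE A (Python) =====
-- import itertools
--
-- def generate_masks(length, max_gaps):
--     """Generate all binary masks for a given length with up to max_gaps. Start/end anchored."""
--     inner_length = length - 2
--     masks = []
--     for inner in itertools.product([0, 1], repeat=inner_length):
--         if inner.count(0) <= max_gaps:
--             mask = (1,) + inner + (1,)
--             masks.append(mask)
--     return masks
-- ===== SOURCE B (Python) =====
-- def generate_masks(length, max_gaps):
--     """Generate all binary masks for a given length with up to max_gaps. Start/end anchored.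
--
--     Pruned breadth-first construction: extend partial inner tuples bit by bit,
--     dropping any branch whose zero budget is exhausted, instead of enumerating
--     all 2**(length-2) tuples and filtering.
--     """
--     if max_gaps < 0:
--         return []
--     frontier = [((), 0)]  # (inner prefix, zeros used so far)
--     for _ in range(length - 2):
--         frontier = [(p + (b,), z + (1 - b))
--                     for (p, z) in frontier
--                     for b in (0, 1)
--                     if b == 1 or z < max_gaps]
--     return [(1,) + p + (1,) for (p, _) in frontier]
-- ===== Notes on version B (the rewrite author's own statement) =====
-- stated objective: faster
-- what changed: Replaces full enumeration of all 2^(length-2) inner tuples followed by a zero-count filter with a pruned breadth-first construction that extends partial prefixes bit by bit and drops a branch as soon as its zero budget is exhausted, so only surviving masks are ever built.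
import Mathlib
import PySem

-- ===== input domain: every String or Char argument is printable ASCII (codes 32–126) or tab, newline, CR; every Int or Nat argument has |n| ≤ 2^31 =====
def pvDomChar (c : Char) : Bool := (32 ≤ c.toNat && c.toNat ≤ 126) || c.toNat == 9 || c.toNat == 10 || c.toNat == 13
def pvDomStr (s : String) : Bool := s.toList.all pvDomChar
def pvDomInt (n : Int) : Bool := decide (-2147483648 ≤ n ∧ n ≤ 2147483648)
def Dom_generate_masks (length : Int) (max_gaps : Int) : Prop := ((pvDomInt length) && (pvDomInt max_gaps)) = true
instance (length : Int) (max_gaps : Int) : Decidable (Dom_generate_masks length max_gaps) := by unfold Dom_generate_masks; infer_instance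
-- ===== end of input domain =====

-- B replaces A's enumerate-all-2^(length-2)-tuples-then-filter loop with a budget-pruned
-- breadth-first construction that only ever builds surviving prefixes (objective: faster).

-- ===== PORT A =====
-- itertools.product([0, 1], repeat=n), in product (lexicographic) order
def pvProdBits : Nat → List (List Int)
  | 0 => [[]]
  | n+1 => ([0, 1] : List Int).flatMap (fun x => (pvProdBits n).map (fun r => x :: r))

def generate_masks (length : Int) (max_gaps : Int) : List (List Int) :=
  let inner_length := length - 2
  (pvProdBits inner_length.toNat).foldl
    (fun masks inner =>
      if ((PySem.List.count inner 0 : Nat) : Int) ≤ max_gaps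
      then masks ++ [[1] ++ inner ++ [1]] else masks) []

-- ===== PORT B =====
def generate_masks_alt (length : Int) (max_gaps : Int) : List (List Int) :=
  if max_gaps < 0 then []
  else
    let frontier :=
      (List.range (length - 2).toNat).foldl
        (fun fr _ =>
          fr.flatMap (fun pz =>
            (if pz.2 < max_gaps then [(pz.1 ++ [(0 : Int)], pz.2 + 1)] else []) ++
            [(pz.1 ++ [(1 : Int)], pz.2)]))
        [(([] : List Int), (0 : Int))]
    frontier.map (fun pz => [1] ++ pz.1 ++ [1])

-- ===== PRECONDITION & SPEC =====
-- Pre_ excludes length < 2, where itertools.product(repeat=negative) makes A raise ValueError.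
def Pre_generate_masks (length : Int) (max_gaps : Int) : Prop := 2 ≤ length
instance (length : Int) (max_gaps : Int) : Decidable (Pre_generate_masks length max_gaps) := by unfold Pre_generate_masks; infer_instance
def pvWitness_generate_masks : Int × Int := (5, 2)

def Spec_generate_masks (length : Int) (max_gaps : Int) (out : List (List Int)) : Prop := out = generate_masks_alt length max_gaps
instance (length : Int) (max_gaps : Int) (out : List (List Int)) : Decidable (Spec_generate_masks length max_gaps out) := by unfold Spec_generate_masks; infer_instance

-- ===== CLAIM (what is proved, stated in full; the proofs are below) =====
def Claim_equal_generate_masks : Prop := ∀ (length : Int) (max_gaps : Int), Dom_generate_masks length max_gaps → Pre_generate_masks length max_gaps → Spec_generate_masks length max_gaps (generate_masks length max_gaps)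

-- ===== LEMMAS AND PROOFS =====

-- the filter predicate of A, the pair tag of B, and the right-extension step
def pvP (g : Int) (l : List Int) : Bool := decide (((PySem.List.count l 0 : Nat) : Int) ≤ g)
def pvQ (l : List Int) : List Int × Int := (l, ((PySem.List.count l 0 : Nat) : Int))
def pvExt (p : List Int) : List (List Int) := [p ++ [(0 : Int)], p ++ [1]]

lemma pvCount0 (a : List Int) : List.count (0 : Int) (a ++ [0]) = List.count 0 a + 1 := by
  simp [List.count_append]

lemma pvCount1 (a : List Int) : List.count (0 : Int) (a ++ [1]) = List.count 0 a := by
  simp [List.count_append]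

lemma pvMapConsFlatMap (x : Int) (l : List (List Int)) :
    (l.flatMap pvExt).map (fun r => x :: r) = (l.map (fun r => x :: r)).flatMap pvExt := by
  induction l with
  | nil => rfl
  | cons a t ih => simp [pvExt, ih]

-- the product lists also grow on the right, one bit at a time
lemma pvProdBits_succ (n : Nat) :
    pvProdBits (n + 1) = (pvProdBits n).flatMap pvExt := by
  induction n with
  | zero => simp [pvProdBits, pvExt]
  | succ n ih =>
    have h1 : pvProdBits (n + 1 + 1)
        = ([0, 1] : List Int).flatMap (fun x => (pvProdBits (n + 1)).map (fun r => x :: r)) := rfl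
    have h2 : pvProdBits (n + 1)
        = ([0, 1] : List Int).flatMap (fun x => (pvProdBits n).map (fun r => x :: r)) := rfl
    conv_rhs => rw [h2]
    rw [h1, ih]
    simp only [List.flatMap_cons, List.flatMap_nil, List.append_nil, List.flatMap_append,
      pvMapConsFlatMap]

-- A's accumulator loop is an append of the filtered, masked product list
lemma pvFoldA (g : Int) (l : List (List Int)) (acc : List (List Int)) :
    l.foldl
      (fun masks inner =>
        if ((PySem.List.count inner 0 : Nat) : Int) ≤ g
        then masks ++ [[1] ++ inner ++ [1]] else masks) acc
    = acc ++ (l.filter (pvP g)).map (fun inner => [1] ++ inner ++ [1]) := by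
  induction l generalizing acc with
  | nil => simp
  | cons a t ih =>
    by_cases h : ((PySem.List.count a 0 : Nat) : Int) ≤ g
    · have hp : pvP g a = true := by simp only [pvP, decide_eq_true_eq]; exact h
      rw [List.foldl_cons, if_pos h, ih, List.filter_cons]
      simp [hp]
    · have hp : pvP g a = false := by simp only [pvP, decide_eq_false_iff_not]; exact h
      rw [List.foldl_cons, if_neg h, ih, List.filter_cons]
      simp [hp]

-- one pruned extension step agrees with extend-then-filter on a single prefix
lemma pvStepExt (g : Int) (a : List Int) (ha : pvP g a = true) :
    (if (pvQ a).2 < g then [((pvQ a).1 ++ [(0 : Int)], (pvQ a).2 + 1)] else []) ++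
      [((pvQ a).1 ++ [(1 : Int)], (pvQ a).2)]
    = ((pvExt a).filter (pvP g)).map pvQ := by
  have ha' : ((List.count (0 : Int) a : Nat) : Int) ≤ g := by
    simpa [pvP, PySem.List.count_eq] using ha
  have k1 : pvP g (a ++ [(1 : Int)]) = true := by
    simp only [pvP, decide_eq_true_eq, PySem.List.count_eq, pvCount1]
    exact ha'
  by_cases h : ((List.count (0 : Int) a : Nat) : Int) < g
  · have k0 : pvP g (a ++ [(0 : Int)]) = true := by
      simp only [pvP, decide_eq_true_eq, PySem.List.count_eq, pvCount0]
      push_cast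
      omega
    simp [pvExt, pvQ, PySem.List.count_eq, List.filter_cons, k0, k1, pvCount0, pvCount1, h]
  · have k0 : pvP g (a ++ [(0 : Int)]) = false := by
      simp only [pvP, decide_eq_false_iff_not, PySem.List.count_eq, pvCount0, not_le]
      push_cast
      omega
    simp [pvExt, pvQ, PySem.List.count_eq, List.filter_cons, k0, k1, pvCount1, h]

-- a pruned prefix stays pruned after either extension
lemma pvStepDead (g : Int) (a : List Int) (ha : ¬ pvP g a = true) :
    (pvExt a).filter (pvP g) = [] := by
  have ha' : ¬ ((List.count (0 : Int) a : Nat) : Int) ≤ g := by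
    simpa [pvP, PySem.List.count_eq] using ha
  have k0 : pvP g (a ++ [(0 : Int)]) = false := by
    simp only [pvP, decide_eq_false_iff_not, PySem.List.count_eq, pvCount0, not_le]
    push_cast
    omega
  have k1 : pvP g (a ++ [(1 : Int)]) = false := by
    simp only [pvP, decide_eq_false_iff_not, PySem.List.count_eq, pvCount1, not_le]
    omega
  simp [pvExt, List.filter_cons, k0, k1]

-- one frontier step = extend every product prefix, filter, tag
lemma pvKey (g : Int) (l : List (List Int)) :
    ((l.filter (pvP g)).map pvQ).flatMap (fun pz =>
        (if pz.2 < g then [(pz.1 ++ [(0 : Int)], pz.2 + 1)] else []) ++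
        [(pz.1 ++ [(1 : Int)], pz.2)])
    = ((l.flatMap pvExt).filter (pvP g)).map pvQ := by
  induction l with
  | nil => rfl
  | cons a t ih =>
    simp only [List.filter_cons, List.flatMap_cons, List.filter_append, List.map_append]
    by_cases h : pvP g a = true
    · simp only [h, if_true, List.map_cons, List.flatMap_cons, ih, pvStepExt g a h]
    · simp only [h, pvStepDead g a h, List.map_nil, List.nil_append]
      exact ih

-- B's frontier after n steps
lemma pvFrontier_eq (g : Int) (hg : 0 ≤ g) (n : Nat) :
    (List.range n).foldl
      (fun fr _ =>
        fr.flatMap (fun pz =>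
          (if pz.2 < g then [(pz.1 ++ [(0 : Int)], pz.2 + 1)] else []) ++
          [(pz.1 ++ [(1 : Int)], pz.2)]))
      [(([] : List Int), (0 : Int))]
    = ((pvProdBits n).filter (pvP g)).map pvQ := by
  induction n with
  | zero =>
    have hp : pvP g ([] : List Int) = true := by
      simp [pvP, PySem.List.count_eq]
      omega
    simp [pvProdBits, hp, pvQ, PySem.List.count_eq]
  | succ n ih =>
    rw [List.range_succ, List.foldl_append, ih, List.foldl_cons, List.foldl_nil,
      pvProdBits_succ, pvKey]

theorem generate_masks_spec : Claim_equal_generate_masks := by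
  intro length max_gaps _ _
  show generate_masks length max_gaps = generate_masks_alt length max_gaps
  by_cases hg : max_gaps < 0
  · have hall : (pvProdBits (length - 2).toNat).filter (pvP max_gaps) = [] := by
      apply List.filter_eq_nil_iff.mpr
      intro a _
      simp only [pvP, decide_eq_true_eq, not_le]
      have : (0 : Int) ≤ ((PySem.List.count a 0 : Nat) : Int) := Int.natCast_nonneg _
      omega
    have hA : generate_masks length max_gaps = [] := by
      simp only [generate_masks]
      rw [pvFoldA, hall]
      simp
    have hB : generate_masks_alt length max_gaps = [] := by
      simp [generate_masks_alt, hg]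
    rw [hA, hB]
  · have hg' : (0 : Int) ≤ max_gaps := Int.not_lt.mp hg
    simp only [generate_masks, generate_masks_alt, if_neg hg, pvFoldA,
      List.nil_append, pvFrontier_eq max_gaps hg', List.map_map]
    rfl
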